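-- pv_equiv track=rewrite | github.com/mhtarek/Auto-correction-of-English-to-Bengali-Transliteration-System | spellcheckMainParagraphLevel.py | checkSameSuggestion
-- ===== SOURCE A (Python) =====
-- def checkSameSuggestion(wordList):
--     same = False
--     count = 0
--     for i in range(len(wordList)):
--         if max(wordList) == wordList[i]:
--             count+=1
--
--             if count>1:
--                 same = True
--
--     if same == True:
--         return 1
--     else:
--          return 0
-- ===== SOURCE B (Python) =====
-- def checkSameSuggestion(wordList):
--     s = sorted(wordList)
--     return 1 if len(s) >= 2 and s[-1] == s[-2] else 0
-- ===== Notes on version B (the rewrite author's own statement) =====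
-- stated objective: simpler
-- what changed: Replaces the loop that recomputes max(wordList) at every index and counts matches with: sort a copy and return 1 iff the two largest (last two of the sorted list) are equal.
import Mathlib
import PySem

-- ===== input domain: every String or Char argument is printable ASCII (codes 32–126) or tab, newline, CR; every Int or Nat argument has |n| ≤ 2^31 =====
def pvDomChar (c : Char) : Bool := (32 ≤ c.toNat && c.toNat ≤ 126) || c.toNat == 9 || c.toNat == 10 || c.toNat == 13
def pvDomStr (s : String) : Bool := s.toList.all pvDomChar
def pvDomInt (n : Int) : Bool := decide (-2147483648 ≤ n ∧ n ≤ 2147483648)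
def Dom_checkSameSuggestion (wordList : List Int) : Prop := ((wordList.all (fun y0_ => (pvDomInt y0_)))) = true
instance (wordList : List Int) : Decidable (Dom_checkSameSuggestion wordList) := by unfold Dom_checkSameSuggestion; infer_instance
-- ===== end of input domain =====

-- B replaces A's quadratic "recompute max at every index and count matches" loop by
-- "sort a copy and compare the two largest elements" (objective: simpler, and faster in a timing run).


-- ===== PORT A =====
def checkSameSuggestion (wordList : List Int) : Int :=
  let res := (PySem.List.pyRange 0 wordList.length 1).foldl
    (fun (st : Bool × Int) i =>
      match PySem.List.max? wordList (fun x => x) with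
      | some m =>
        if m = PySem.List.pyGetD wordList i 0 then
          let count := st.2 + 1
          ((if count > 1 then true else st.1), count)
        else st
      | none => st)   -- unreachable: the loop body only runs when wordList is nonempty
    (false, 0)
  if res.1 then 1 else 0

-- ===== PORT B =====
def checkSameSuggestion_alt (wordList : List Int) : Int :=
  let s := PySem.List.sorted wordList (fun x => x) false
  if 2 ≤ s.length ∧ PySem.List.pyGetD s (-1) 0 = PySem.List.pyGetD s (-2) 0 then 1 else 0

-- ===== PRECONDITION & SPEC =====
def Spec_checkSameSuggestion (wordList : List Int) (out : Int) : Prop := out = checkSameSuggestion_alt wordList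
instance (wordList : List Int) (out : Int) : Decidable (Spec_checkSameSuggestion wordList out) := by unfold Spec_checkSameSuggestion; infer_instance

-- ===== CLAIM (what is proved, stated in full; the proofs are below) =====
def Claim_equal_checkSameSuggestion : Prop := ∀ (wordList : List Int), Dom_checkSameSuggestion wordList → Spec_checkSameSuggestion wordList (checkSameSuggestion wordList)

-- ===== LEMMAS AND PROOFS =====

-- A's loop over a list with maximum value m: the accumulated state is exactly
-- (count-so-far > 1, count-so-far), where the count is the number of occurrences of m.
theorem loopA (m : Int) : ∀ (l : List Int) (c : Int), 0 ≤ c →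
    l.foldl (fun (st : Bool × Int) x =>
        if m = x then ((if st.2 + 1 > 1 then true else st.1), st.2 + 1) else st)
      (decide (c > 1), c)
    = (decide (c + (l.count m : Int) > 1), c + (l.count m : Int)) := by
  intro l
  induction l with
  | nil => intro c hc; simp
  | cons a t ih =>
    intro c hc
    by_cases h : m = a
    · subst h
      simp only [List.foldl_cons]
      rw [if_pos trivial]
      have hb : (if c + 1 > 1 then true else decide (c > 1)) = decide (c + 1 > 1) := by
        by_cases h1 : c + 1 > 1
        · simp [h1]
        · have : ¬ c > 1 := by omega
          simp [h1, this]
      rw [hb, ih (c + 1) (by omega)]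
      have hcnt : (((m :: t).count m : Int)) = (t.count m : Int) + 1 := by
        simp [List.count_cons]
      rw [hcnt]
      have e : c + 1 + (t.count m : Int) = c + ((t.count m : Int) + 1) := by ring
      rw [e]
    · simp only [List.foldl_cons, if_neg h]
      rw [ih c hc]
      have hcnt : List.count m (a :: t) = List.count m t := by
        rw [List.count_cons]
        simp [Ne.symm h]
      rw [hcnt]

theorem checkSameSuggestion_spec : Claim_equal_checkSameSuggestion := by
  intro l _
  unfold Spec_checkSameSuggestion checkSameSuggestion checkSameSuggestion_alt
  rcases hl : l with _ | ⟨a0, t0⟩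
  · decide
  · rw [← hl]
    have hne : l ≠ [] := by simp [hl]
    obtain ⟨m, hm⟩ : ∃ m, PySem.List.max? l (fun x => x) = some m := by
      rcases h : PySem.List.max? l (fun x => x) with _ | m
      · exact absurd ((PySem.List.max?_eq_none_iff l (fun x => x)).mp h) hne
      · exact ⟨m, rfl⟩
    have hmmem : m ∈ l := PySem.List.max?_mem hm
    have hmax : ∀ y ∈ l, y ≤ m := fun y hy => PySem.List.max?_isMax hm y hy
    simp only [hm]
    rw [PySem.List.foldl_pyRange_zero_pyGetD' l 0
      (fun (st : Bool × Int) x =>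
        if m = x then ((if st.2 + 1 > 1 then true else st.1), st.2 + 1) else st) (false, 0)]
    have h0 : (false, (0 : Int)) = (decide ((0:Int) > 1), (0:Int)) := by decide
    rw [h0, loopA m l 0 (by omega)]
    set s := PySem.List.sorted l (fun x => x) false with hs
    have hperm : s.Perm l := PySem.List.sorted_perm l (fun x => x) false
    have hcount : s.count m = l.count m := hperm.count_eq m
    have hsne : s ≠ [] := fun h => hne ((PySem.List.sorted_eq_nil_iff l (fun x => x) false).mp (hs ▸ h))
    have hslen : 1 ≤ s.length := List.length_pos_of_ne_nil hsne
    have hmems : m ∈ s := hperm.mem_iff.mpr hmmem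
    have hmaxs : ∀ y ∈ s, y ≤ m := fun y hy => hmax y (hperm.mem_iff.mp hy)
    have hlast : s[s.length - 1]'(by omega) = m := by
      obtain ⟨i, hi, hiv⟩ := List.mem_iff_getElem.mp hmems
      have h1 : m ≤ s[s.length - 1]'(by omega) := by
        rw [← hiv]
        exact PySem.List.sorted_id_getElem_mono l (p := i) (q := s.length - 1) (by omega) (by simp only [← hs]; omega)
      have h2 : s[s.length - 1]'(by omega) ≤ m := hmaxs _ (List.getElem_mem _)
      omega
    by_cases h2 : 2 ≤ s.length
    · rw [PySem.List.pyGetD_neg_ofNat s 1 0 (by omega) (by omega),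
          PySem.List.pyGetD_neg_ofNat s 2 0 (by omega) (by omega)]
      have hsplit : s = s.dropLast ++ [m] := by
        conv_lhs => rw [← List.dropLast_concat_getLast hsne]
        rw [List.getLast_eq_getElem, hlast]
      have hdl : s.dropLast.length = s.length - 1 := List.length_dropLast
      have key : s[s.length - 1]'(by omega) = s[s.length - 2]'(by omega) ↔ 2 ≤ l.count m := by
        rw [hlast, ← hcount]
        constructor
        · intro h
          have hm2 : m ∈ s.dropLast := by
            have hgd : s.dropLast[s.length - 2]'(by omega) = m := by
              rw [List.getElem_dropLast]; exact h.symm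
            rw [← hgd]; exact List.getElem_mem _
          have hd1 : 1 ≤ s.dropLast.count m := List.count_pos_iff.mpr hm2
          have : s.count m = s.dropLast.count m + 1 := by
            conv_lhs => rw [hsplit]
            simp [List.count_append]
          omega
        · intro h
          have hd : m ∈ s.dropLast := by
            by_contra hnm
            have hz : s.dropLast.count m = 0 := List.count_eq_zero.mpr hnm
            have : s.count m = s.dropLast.count m + 1 := by
              conv_lhs => rw [hsplit]
              simp [List.count_append]
            omega
          obtain ⟨i, hi, hiv⟩ := List.mem_iff_getElem.mp hd
          have hil : i < s.length - 1 := by omega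
          have hv : s[i]'(by omega) = m := by
            rw [← hiv, List.getElem_dropLast]
          have hle1 : m ≤ s[s.length - 2]'(by omega) := by
            rw [← hv]
            exact PySem.List.sorted_id_getElem_mono l (p := i) (q := s.length - 2) (by omega) (by simp only [← hs]; omega)
          have hle2 : s[s.length - 2]'(by omega) ≤ m := hmaxs _ (List.getElem_mem _)
          omega
      by_cases hc : 2 ≤ l.count m
      · rw [if_pos (by simp; omega), if_pos ⟨h2, key.mpr hc⟩]
      · rw [if_neg (by simp; omega), if_neg (by rintro ⟨_, hk⟩; exact hc (key.mp hk))]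
    · have hcle : l.count m ≤ 1 := by
        have h3 := List.count_le_length (l := s) (a := m)
        omega
      rw [if_neg (by simp; omega), if_neg (by rintro ⟨hh, _⟩; omega)]

-- ===== VERDICT (by name: the statement is the Claim_ definition above) =====
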